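-- pv_equiv track=rewrite | github.com/alanclaros/teamwork | utils/permissions.py | rango_periodos
-- ===== SOURCE A (Python) =====
-- def next_periodo(periodo):
--     anio = periodo[0:4]
--     mes = periodo[4:6]
--     if mes == '12':
--         n_anio = int(anio) + 1
--         return str(n_anio) + '01'
--     else:
--         n_mes = int(mes) + 1
--         aux_mes = str(n_mes)
--         if len(aux_mes) == 1:
--             aux_mes = '0' + aux_mes
--
--         return anio + aux_mes
--
-- def previous_periodo(periodo):
--     anio = periodo[0:4]
--     mes = periodo[4:6]
--     if mes == '01':
--         n_anio = int(anio) - 1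
--         return str(n_anio) + '12'
--     else:
--         n_mes = int(mes) - 1
--         aux_mes = str(n_mes)
--         if len(aux_mes) == 1:
--             aux_mes = '0' + aux_mes
--
--         return anio + aux_mes
--
-- def rango_periodos(periodo):
--     periodo_actual = periodo
--     periodo_ant = periodo_actual
--     retorno = []
--     retorno.append(periodo_actual)
--     for i in range(10):
--         periodo_ant = previous_periodo(periodo_ant)
--         retorno.insert(0, periodo_ant)
--
--     periodo_next = next_periodo(periodo_actual)
--     retorno.append(periodo_next)
--     periodo_next = next_periodo(periodo_next)
--     retorno.append(periodo_next)
--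
--     return retorno
-- ===== SOURCE B (Python) =====
-- def rango_periodos(periodo):
--     def shift(p, d):
--         anio, mes = p[0:4], p[4:6]
--         if d < 0 and mes == '01':
--             return str(int(anio) + d) + '12'
--         if d > 0 and mes == '12':
--             return str(int(anio) + d) + '01'
--         return anio + str(int(mes) + d).zfill(2)
--
--     def at_offset(off):
--         p = periodo
--         for _ in range(abs(off)):
--             p = shift(p, -1 if off < 0 else 1)
--         return p
--
--     return [at_offset(off) for off in range(-10, 3)]
-- ===== Notes on version B (the rewrite author's own statement) =====
-- stated objective: alternative
-- what changed: Replaces the stateful backward/forward chain (ten previous_periodo steps threaded through insert(0, ...), then two next_periodo appends, with two near-duplicate helpers) by one signed shift helper and a forward list comprehension over range(-10, 3) that recomputes each period independently by applying the shift |off| times, with zfill(2) instead of the manual zero-pad.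
-- outside the precondition, e.g. on rango_periodos('01'): A raises ValueError, B raises ValueError; on rango_periodos('12'): A raises ValueError, B raises ValueError
import Mathlib
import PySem

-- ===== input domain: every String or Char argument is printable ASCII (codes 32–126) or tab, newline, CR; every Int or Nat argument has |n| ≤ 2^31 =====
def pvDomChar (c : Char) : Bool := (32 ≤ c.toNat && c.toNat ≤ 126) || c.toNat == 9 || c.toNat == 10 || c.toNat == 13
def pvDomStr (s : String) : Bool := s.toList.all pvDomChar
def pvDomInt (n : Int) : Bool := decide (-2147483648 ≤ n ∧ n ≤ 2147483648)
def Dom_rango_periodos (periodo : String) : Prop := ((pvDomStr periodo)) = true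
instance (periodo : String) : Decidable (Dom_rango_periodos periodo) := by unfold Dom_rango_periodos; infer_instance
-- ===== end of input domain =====

-- B replaces A's stateful chain (ten previous_periodo steps threaded through insert(0, ...), then two next_periodo appends,
-- with two near-duplicate helpers) by one signed step helper and a map over the offsets -10..2 that recomputes each period
-- independently from the input (objective: alternative).  Strings are carried as List Char (PySem string functions are
-- defined on the list side); String.ofList wraps at the end.

-- ===== PORT A =====
-- previous_periodo: int(s) is PySem.Int.ofChars? (none = ValueError; .getD 0 stands for the raise, on which nothing is claimed)
def pvPrevA (p : List Char) : List Char :=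
  let anio := PySem.List.slice p (some 0) (some 4)
  let mes  := PySem.List.slice p (some 4) (some 6)
  if mes = ['0', '1'] then
    PySem.Int.toChars ((PySem.Int.ofChars? anio).getD 0 - 1) ++ ['1', '2']
  else
    let n_mes := (PySem.Int.ofChars? mes).getD 0 - 1
    let aux_mes := PySem.Int.toChars n_mes
    let aux_mes := if aux_mes.length = 1 then '0' :: aux_mes else aux_mes
    anio ++ aux_mes

-- next_periodo
def pvNextA (p : List Char) : List Char :=
  let anio := PySem.List.slice p (some 0) (some 4)
  let mes  := PySem.List.slice p (some 4) (some 6)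
  if mes = ['1', '2'] then
    PySem.Int.toChars ((PySem.Int.ofChars? anio).getD 0 + 1) ++ ['0', '1']
  else
    let n_mes := (PySem.Int.ofChars? mes).getD 0 + 1
    let aux_mes := PySem.Int.toChars n_mes
    let aux_mes := if aux_mes.length = 1 then '0' :: aux_mes else aux_mes
    anio ++ aux_mes

def rango_periodos (periodo : String) : List String :=
  let periodo_actual := periodo.toList
  let st := (List.range 10).foldl
    (fun (st : List Char × List (List Char)) _ =>
      let periodo_ant := pvPrevA st.1
      (periodo_ant, PySem.List.insert st.2 0 periodo_ant))
    (periodo_actual, [periodo_actual])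
  let retorno := st.2
  let periodo_next := pvNextA periodo_actual
  let retorno := retorno ++ [periodo_next]
  let periodo_next := pvNextA periodo_next
  let retorno := retorno ++ [periodo_next]
  retorno.map String.ofList

-- ===== PORT B =====
-- shift(p, d): one signed step (d = -1 or 1); str(...).zfill(2) is PySem.Chars.zfill
def pvShiftB (p : List Char) (d : Int) : List Char :=
  let anio := PySem.List.slice p (some 0) (some 4)
  let mes  := PySem.List.slice p (some 4) (some 6)
  if d < 0 ∧ mes = ['0', '1'] then
    PySem.Int.toChars ((PySem.Int.ofChars? anio).getD 0 + d) ++ ['1', '2']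
  else if 0 < d ∧ mes = ['1', '2'] then
    PySem.Int.toChars ((PySem.Int.ofChars? anio).getD 0 + d) ++ ['0', '1']
  else
    anio ++ PySem.Chars.zfill (PySem.Int.toChars ((PySem.Int.ofChars? mes).getD 0 + d)) 2

-- at_offset(off): apply shift |off| times starting from the input
def pvAtOffsetB (periodo : List Char) (off : Int) : List Char :=
  (List.range off.natAbs).foldl
    (fun p _ => pvShiftB p (if off < 0 then -1 else 1)) periodo

def rango_periodos_alt (periodo : String) : List String :=
  (PySem.List.pyRange (-10) 3 1).map
    (fun off => String.ofList (pvAtOffsetB periodo.toList off))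

-- ===== PRECONDITION & SPEC =====
-- the two fields A slices out of the input, and their int() parses
def pvMesStr (periodo : String) : List Char := PySem.List.slice periodo.toList (some 4) (some 6)
def pvAnioStr (periodo : String) : List Char := PySem.List.slice periodo.toList (some 0) (some 4)
def pvMes (periodo : String) : Int := (PySem.Int.ofChars? (pvMesStr periodo)).getD 0
def pvAnio (periodo : String) : Int := (PySem.Int.ofChars? (pvAnioStr periodo)).getD 0

-- Pre_ excludes exactly the inputs on which some int() along A's twelve steps raises ValueError: the month field must
-- parse, and whenever a year boundary is crossed inside the walk (month slice '01'/'12', or month value 2..10 backward /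
-- 11 forward) the year field must parse and, unless the wrap is the walk's very last step (month 10 backward, 11
-- forward), the stepped year must print at least 3 characters (value >= 100 or <= -10), else a later slice is empty.
def Pre_rango_periodos (periodo : String) : Prop :=
  (PySem.Int.ofChars? (pvMesStr periodo)).isSome = true ∧
  ((pvMesStr periodo = ['0', '1'] ∨ (2 ≤ pvMes periodo ∧ pvMes periodo ≤ 10)) →
    ((PySem.Int.ofChars? (pvAnioStr periodo)).isSome = true ∧
     (pvMes periodo = 10 ∨ 100 ≤ pvAnio periodo - 1 ∨ pvAnio periodo - 1 ≤ -10))) ∧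
  ((pvMesStr periodo = ['1', '2'] ∨ pvMes periodo = 11) →
    ((PySem.Int.ofChars? (pvAnioStr periodo)).isSome = true ∧
     (pvMes periodo = 11 ∨ 100 ≤ pvAnio periodo + 1 ∨ pvAnio periodo + 1 ≤ -10)))
instance (periodo : String) : Decidable (Pre_rango_periodos periodo) := by
  unfold Pre_rango_periodos; infer_instance
def pvWitness_rango_periodos : String := "202502"

def Spec_rango_periodos (periodo : String) (out : List String) : Prop := out = rango_periodos_alt periodo
instance (periodo : String) (out : List String) : Decidable (Spec_rango_periodos periodo out) := by
  unfold Spec_rango_periodos; infer_instance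

-- ===== CLAIM (what is proved, stated in full; the proofs are below) =====
def Claim_equal_rango_periodos : Prop := ∀ (periodo : String), Dom_rango_periodos periodo → Pre_rango_periodos periodo → Spec_rango_periodos periodo (rango_periodos periodo)

-- ===== LEMMAS AND PROOFS =====

/-- The decimal digit characters of `n`, most significant first (what `Nat.toDigits 10` computes). -/
def pvDig (n : Nat) : List Char :=
  if _h : n < 10 then [Nat.digitChar n]
  else pvDig (n / 10) ++ [Nat.digitChar (n % 10)]
termination_by n
decreasing_by exact Nat.div_lt_self (by omega) (by omega)

lemma pvDig_core (f : Nat) : ∀ (n : Nat) (acc : List Char), n ≤ f →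
    Nat.toDigitsCore 10 (f + 1) n acc = pvDig n ++ acc := by
  induction f with
  | zero =>
    intro n acc h
    have hn : n = 0 := by omega
    subst hn
    rw [show Nat.toDigitsCore 10 1 0 acc = Nat.digitChar (0 % 10) :: acc from rfl]
    rw [pvDig]
    simp
  | succ f ih =>
    intro n acc h
    rw [show Nat.toDigitsCore 10 (f + 1 + 1) n acc =
        (if n / 10 = 0 then Nat.digitChar (n % 10) :: acc
         else Nat.toDigitsCore 10 (f + 1) (n / 10) (Nat.digitChar (n % 10) :: acc)) from rfl]
    by_cases h10 : n / 10 = 0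
    · have hlt : n < 10 := by omega
      rw [if_pos h10, pvDig, dif_pos hlt, Nat.mod_eq_of_lt hlt]
      simp
    · have hge : ¬ n < 10 := by omega
      have hdiv : n / 10 < n := Nat.div_lt_self (by omega) (by omega)
      rw [if_neg h10, ih (n / 10) _ (by omega)]
      conv_rhs => rw [pvDig]
      rw [dif_neg hge]
      simp

lemma toDigits_eq_pvDig (n : Nat) : Nat.toDigits 10 n = pvDig n := by
  rw [show Nat.toDigits 10 n = Nat.toDigitsCore 10 (n + 1) n [] from rfl,
     pvDig_core n n [] le_rfl]
  simp

lemma pvDig_ne_nil (n : Nat) : pvDig n ≠ [] := by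
  rw [pvDig]
  split <;> simp

/-- If `str(n)` has a single character, it is the digit of `n < 10`. -/
lemma toChars_len1 (n : Int) (h : (PySem.Int.toChars n).length = 1) :
    ∃ m : Nat, m < 10 ∧ PySem.Int.toChars n = [Nat.digitChar m] := by
  rw [PySem.Int.toChars] at h ⊢
  by_cases hn : n < 0
  · rw [if_pos hn] at h
    exfalso
    have := pvDig_ne_nil n.natAbs
    rw [toDigits_eq_pvDig] at h
    simp at h
    exact this h
  · rw [if_neg hn] at h ⊢
    rw [toDigits_eq_pvDig] at h ⊢
    rw [pvDig] at h ⊢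
    split at h
    · next hm => exact ⟨n.toNat, hm, by rw [pvDig, dif_pos hm]⟩
    · exfalso
      rw [List.length_append] at h
      simp at h
      exact pvDig_ne_nil _ h

lemma toChars_ne_nil (n : Int) : PySem.Int.toChars n ≠ [] := by
  rw [PySem.Int.toChars]
  split
  · simp
  · rw [toDigits_eq_pvDig]; exact pvDig_ne_nil _

/-- `str(n).zfill(2)` is exactly A's pad-if-single-character on the print of an integer. -/
lemma zfill2_toChars (n : Int) :
    PySem.Chars.zfill (PySem.Int.toChars n) 2 =
      (if (PySem.Int.toChars n).length = 1 then '0' :: PySem.Int.toChars n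
       else PySem.Int.toChars n) := by
  by_cases h1 : (PySem.Int.toChars n).length = 1
  · obtain ⟨m, hm, he⟩ := toChars_len1 n h1
    rw [if_pos h1, he]
    interval_cases m <;> decide
  · have h0 : PySem.Int.toChars n ≠ [] := toChars_ne_nil n
    have h2 : 2 ≤ (PySem.Int.toChars n).length := by
      have : (PySem.Int.toChars n).length ≠ 0 := by
        simpa using fun h => h0 (List.length_eq_zero_iff.mp h)
      omega
    rw [if_neg h1, PySem.Chars.zfill.eq_def, if_pos (by exact_mod_cast h2)]

/-- B's step with d = -1 is A's previous_periodo. -/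
lemma shift_neg (p : List Char) : pvShiftB p (-1) = pvPrevA p := by
  simp only [pvShiftB, pvPrevA]
  by_cases h : PySem.List.slice p (some 4) (some 6) = ['0', '1']
  · rw [if_pos ⟨by norm_num, h⟩, if_pos h, sub_eq_add_neg]
  · rw [if_neg (by simp [h]), if_neg (by norm_num), if_neg h]
    rw [show ((PySem.Int.ofChars? (PySem.List.slice p (some 4) (some 6))).getD 0 + (-1) : Int)
        = (PySem.Int.ofChars? (PySem.List.slice p (some 4) (some 6))).getD 0 - 1 from by ring]
    rw [zfill2_toChars]

/-- B's step with d = 1 is A's next_periodo. -/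
lemma shift_pos (p : List Char) : pvShiftB p 1 = pvNextA p := by
  simp only [pvShiftB, pvNextA]
  by_cases h : PySem.List.slice p (some 4) (some 6) = ['1', '2']
  · rw [if_neg (by norm_num), if_pos ⟨by norm_num, h⟩, if_pos h]
  · rw [if_neg (by norm_num), if_neg (by simp [h]), if_neg h]
    rw [zfill2_toChars]

lemma A_eval (s : String) : rango_periodos s = List.map String.ofList
    [pvPrevA (pvPrevA (pvPrevA (pvPrevA (pvPrevA (pvPrevA (pvPrevA (pvPrevA (pvPrevA (pvPrevA s.toList))))))))),
     pvPrevA (pvPrevA (pvPrevA (pvPrevA (pvPrevA (pvPrevA (pvPrevA (pvPrevA (pvPrevA s.toList)))))))),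
     pvPrevA (pvPrevA (pvPrevA (pvPrevA (pvPrevA (pvPrevA (pvPrevA (pvPrevA s.toList))))))),
     pvPrevA (pvPrevA (pvPrevA (pvPrevA (pvPrevA (pvPrevA (pvPrevA s.toList)))))),
     pvPrevA (pvPrevA (pvPrevA (pvPrevA (pvPrevA (pvPrevA s.toList))))),
     pvPrevA (pvPrevA (pvPrevA (pvPrevA (pvPrevA s.toList)))),
     pvPrevA (pvPrevA (pvPrevA (pvPrevA s.toList))),
     pvPrevA (pvPrevA (pvPrevA s.toList)),
     pvPrevA (pvPrevA s.toList),
     pvPrevA s.toList,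
     s.toList,
     pvNextA s.toList,
     pvNextA (pvNextA s.toList)] := by
  simp only [rango_periodos, show List.range 10 = [0, 1, 2, 3, 4, 5, 6, 7, 8, 9] from rfl,
    List.foldl_cons, List.foldl_nil, PySem.List.insert_zero]
  rfl

lemma atOff_neg (q : List Char) (k : Nat) :
    pvAtOffsetB q (-(k + 1 : Nat)) = pvShiftB (pvAtOffsetB q (-(k : Nat))) (-1) := by
  simp only [pvAtOffsetB]
  have hneg : ∀ j : Nat, ((-(j + 1 : Nat) : Int) < 0) := by intro j; omega
  have hna : (-(k + 1 : Nat) : Int).natAbs = k + 1 := by omega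
  rw [hna, List.range_succ, List.foldl_append, List.foldl_cons, List.foldl_nil,
      if_pos (hneg k)]
  by_cases hk : k = 0
  · subst hk; rfl
  · have hna' : (-(k : Nat) : Int).natAbs = k := by omega
    rw [hna', if_pos (by omega : (-(k : Nat) : Int) < 0)]

lemma B_eval (s : String) : rango_periodos_alt s = List.map String.ofList
    [pvPrevA (pvPrevA (pvPrevA (pvPrevA (pvPrevA (pvPrevA (pvPrevA (pvPrevA (pvPrevA (pvPrevA s.toList))))))))),
     pvPrevA (pvPrevA (pvPrevA (pvPrevA (pvPrevA (pvPrevA (pvPrevA (pvPrevA (pvPrevA s.toList)))))))),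
     pvPrevA (pvPrevA (pvPrevA (pvPrevA (pvPrevA (pvPrevA (pvPrevA (pvPrevA s.toList))))))),
     pvPrevA (pvPrevA (pvPrevA (pvPrevA (pvPrevA (pvPrevA (pvPrevA s.toList)))))),
     pvPrevA (pvPrevA (pvPrevA (pvPrevA (pvPrevA (pvPrevA s.toList))))),
     pvPrevA (pvPrevA (pvPrevA (pvPrevA (pvPrevA s.toList)))),
     pvPrevA (pvPrevA (pvPrevA (pvPrevA s.toList))),
     pvPrevA (pvPrevA (pvPrevA s.toList)),
     pvPrevA (pvPrevA s.toList),
     pvPrevA s.toList,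
     s.toList,
     pvNextA s.toList,
     pvNextA (pvNextA s.toList)] := by
  have hstep : ∀ (q : List Char) (k : Nat),
      pvAtOffsetB q (-(k + 1 : Nat)) = pvPrevA (pvAtOffsetB q (-(k : Nat))) := by
    intro q k
    rw [atOff_neg, shift_neg]
  have h0 : ∀ q : List Char, pvAtOffsetB q (-(0 : Nat)) = q := fun _ => rfl
  have hP : ∀ (q : List Char) (k : Nat), pvAtOffsetB q (-(k : Nat)) = pvPrevA^[k] q := by
    intro q k
    induction k with
    | zero => exact h0 q
    | succ k ih => rw [hstep, ih, Function.iterate_succ_apply']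
  have h1 : ∀ q : List Char, pvAtOffsetB q 1 = pvNextA q := by
    intro q
    simp only [pvAtOffsetB]
    rw [show ((1 : Int).natAbs) = 1 from rfl, show List.range 1 = [0] from rfl,
        List.foldl_cons, List.foldl_nil, if_neg (by omega), shift_pos]
  have h2 : ∀ q : List Char, pvAtOffsetB q 2 = pvNextA (pvNextA q) := by
    intro q
    simp only [pvAtOffsetB]
    rw [show ((2 : Int).natAbs) = 2 from rfl, show List.range 2 = [0, 1] from rfl,
        List.foldl_cons, List.foldl_cons, List.foldl_nil, if_neg (by omega),
        shift_pos, shift_pos]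
  simp only [rango_periodos_alt,
    show PySem.List.pyRange (-10) 3 1 = [(-10 : Int), -9, -8, -7, -6, -5, -4, -3, -2, -1, 0, 1, 2] from by decide,
    List.map_cons, List.map_nil]
  rw [show (-10 : Int) = -((10 : Nat) : Int) from by norm_num,
      show (-9 : Int) = -((9 : Nat) : Int) from by norm_num,
      show (-8 : Int) = -((8 : Nat) : Int) from by norm_num,
      show (-7 : Int) = -((7 : Nat) : Int) from by norm_num,
      show (-6 : Int) = -((6 : Nat) : Int) from by norm_num,
      show (-5 : Int) = -((5 : Nat) : Int) from by norm_num,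
      show (-4 : Int) = -((4 : Nat) : Int) from by norm_num,
      show (-3 : Int) = -((3 : Nat) : Int) from by norm_num,
      show (-2 : Int) = -((2 : Nat) : Int) from by norm_num,
      show (-1 : Int) = -((1 : Nat) : Int) from by norm_num,
      show (0 : Int) = -((0 : Nat) : Int) from by norm_num]
  simp only [hP, h1, h2]
  simp [Function.iterate_succ_apply', -Function.iterate_succ]

-- ===== VERDICT (by name: the statement is the Claim_ definition above) =====
theorem rango_periodos_spec : Claim_equal_rango_periodos := by
  intro periodo _ _
  unfold Spec_rango_periodos
  rw [A_eval, B_eval]
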